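-- pv_equiv track=rewrite | github.com/dbbuilder/autoplaytest | src/core/executor/session_aware_executor.py | _sort_tests_for_session
-- ===== SOURCE A (Python) =====
-- from typing import Dict, List, Optional, Any, Tuple
--
-- def _sort_tests_for_session(test_scripts: List[Dict[str, Any]]) -> List[Dict[str, Any]]:
--     """
--     Sort tests to ensure login tests run first.
--
--     Args:
--         test_scripts: List of test scripts
--
--     Returns:
--         Sorted list with login tests first
--     """
--     login_tests = []
--     other_tests = []
--
--     for script in test_scripts:
--         if script.get('type') == 'login':
--             login_tests.append(script)
--         else:
--             other_tests.append(script)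
--
--     # Return login tests first, then others
--     return login_tests + other_tests
-- ===== SOURCE B (Python) =====
-- from typing import Dict, List, Optional, Any, Tuple
--
-- def _sort_tests_for_session(test_scripts: List[Dict[str, Any]]) -> List[Dict[str, Any]]:
--     """Sort tests so login tests run first (stable): single stable sort on a boolean key."""
--     return sorted(test_scripts, key=lambda s: s.get('type') != 'login')
-- ===== Notes on version B (the rewrite author's own statement) =====
-- stated objective: idiomatic
-- what changed: Replaced the explicit two-bucket partition-and-concatenate loop with a single stable sort keyed on whether the script is not a login test; the login-first order emerges from sort stability instead of maintained buckets.
import Mathlib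
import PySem

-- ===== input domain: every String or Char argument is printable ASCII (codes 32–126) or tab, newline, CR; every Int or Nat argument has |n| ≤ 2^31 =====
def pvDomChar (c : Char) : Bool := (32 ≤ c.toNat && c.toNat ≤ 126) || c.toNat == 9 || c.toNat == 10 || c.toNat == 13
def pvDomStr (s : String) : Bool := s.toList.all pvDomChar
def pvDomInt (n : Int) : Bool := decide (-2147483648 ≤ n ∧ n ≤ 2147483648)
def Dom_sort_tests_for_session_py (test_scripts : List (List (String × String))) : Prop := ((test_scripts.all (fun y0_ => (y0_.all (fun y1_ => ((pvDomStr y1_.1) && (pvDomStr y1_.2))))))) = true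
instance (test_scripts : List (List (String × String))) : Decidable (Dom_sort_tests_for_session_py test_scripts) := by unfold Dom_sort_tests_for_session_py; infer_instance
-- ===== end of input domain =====

-- B replaces A's explicit two-bucket partition loop with one stable sort on a boolean key
-- ("is not a login test"); objective: idiomatic, same result, not claimed faster.

-- ===== PORT A =====
-- for script in test_scripts: append to login_tests / other_tests; return login_tests + other_tests
def sort_tests_for_session_py (test_scripts : List (List (String × String))) : List (List (String × String)) :=
  (test_scripts.foldl
    (fun (acc : List (List (String × String)) × List (List (String × String))) script =>
      if PySem.Dict.get? (PySem.Dict.mk script) "type" = some "login" then (acc.1 ++ [script], acc.2)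
      else (acc.1, acc.2 ++ [script]))
    ([], [])).1 ++
  (test_scripts.foldl
    (fun (acc : List (List (String × String)) × List (List (String × String))) script =>
      if PySem.Dict.get? (PySem.Dict.mk script) "type" = some "login" then (acc.1 ++ [script], acc.2)
      else (acc.1, acc.2 ++ [script]))
    ([], [])).2

-- ===== PORT B =====
-- return sorted(test_scripts, key=lambda s: s.get('type') != 'login')  (stable; False sorts first)
def sort_tests_for_session_py_alt (test_scripts : List (List (String × String))) : List (List (String × String)) :=
  PySem.List.sorted test_scripts (fun s => decide (PySem.Dict.get? (PySem.Dict.mk s) "type" ≠ some "login")) false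

-- ===== PRECONDITION & SPEC =====
def Spec_sort_tests_for_session_py (test_scripts : List (List (String × String))) (out : List (List (String × String))) : Prop := out = sort_tests_for_session_py_alt test_scripts
instance (test_scripts : List (List (String × String))) (out : List (List (String × String))) : Decidable (Spec_sort_tests_for_session_py test_scripts out) := by unfold Spec_sort_tests_for_session_py; infer_instance

-- ===== CLAIM (what is proved, stated in full; the proofs are below) =====
def Claim_equal_sort_tests_for_session_py : Prop := ∀ (test_scripts : List (List (String × String))), Dom_sort_tests_for_session_py test_scripts → Spec_sort_tests_for_session_py test_scripts (sort_tests_for_session_py test_scripts)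

-- ===== LEMMAS AND PROOFS =====

theorem insertBy_cons_of_before {α : Type} (before : α → α → Bool) (x y : α) (ys : List α)
    (h : before x y = true) :
    PySem.List.insertBy before x (y :: ys) = x :: y :: ys := by
  simp [PySem.List.insertBy, h]

theorem insertBy_append_left {α : Type} (before : α → α → Bool) (x : α) (F ys : List α)
    (hF : ∀ a ∈ F, before x a = false) :
    PySem.List.insertBy before x (F ++ ys) = F ++ PySem.List.insertBy before x ys := by
  induction F with
  | nil => simp
  | cons a F ih =>
    have ha : before x a = false := hF a (by simp)
    simp only [List.cons_append, PySem.List.insertBy, ha]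
    simp only [Bool.false_eq_true, if_false]
    exact congrArg (a :: ·) (ih (fun b hb => hF b (by simp [hb])))

theorem insertBy_all_before {α : Type} (before : α → α → Bool) (x : α) (T : List α)
    (hT : ∀ a ∈ T, before x a = true) :
    PySem.List.insertBy before x T = x :: T := by
  cases T with
  | nil => simp [PySem.List.insertBy]
  | cons t ts => exact insertBy_cons_of_before before x t ts (hT t (by simp))

theorem sorted_fold_bool {α : Type} (key : α → Bool) :
    ∀ (xs F T : List α), (∀ a ∈ F, key a = false) → (∀ a ∈ T, key a = true) →
    xs.foldl (fun acc x => PySem.List.insertBy (fun a b => decide (key a < key b)) x acc) (F ++ T)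
      = (F ++ xs.filter (fun x => !key x)) ++ (T ++ xs.filter key) := by
  intro xs
  induction xs with
  | nil => intro F T _ _; simp
  | cons x xs ih =>
    intro F T hF hT
    simp only [List.foldl_cons]
    cases hx : key x with
    | false =>
      have hstep : PySem.List.insertBy (fun a b => decide (key a < key b)) x (F ++ T)
          = (F ++ [x]) ++ T := by
        rw [insertBy_append_left _ _ _ _ (fun a ha => by simp [hx, hF a ha])]
        rw [insertBy_all_before _ _ _ (fun a ha => by simp [hx, hT a ha])]
        simp
      rw [hstep, ih (F ++ [x]) T
        (by intro a ha; rcases List.mem_append.1 ha with h | h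
            · exact hF a h
            · simp at h; subst h; exact hx) hT]
      simp [hx]
    | true =>
      have hstep : PySem.List.insertBy (fun a b => decide (key a < key b)) x (F ++ T)
          = F ++ (T ++ [x]) := by
        rw [show F ++ (T ++ [x]) = (F ++ T) ++ [x] by simp]
        exact PySem.List.insertBy_of_forall_not_before _ _ _
          (fun a _ => by simp [hx])
      rw [hstep, ih F (T ++ [x]) hF
        (by intro a ha; rcases List.mem_append.1 ha with h | h
            · exact hT a h
            · simp at h; subst h; exact hx)]
      simp [hx]

theorem partition_fold {α : Type} (p : α → Bool) :
    ∀ (xs L O : List α),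
    xs.foldl (fun (acc : List α × List α) x =>
        if p x then (acc.1 ++ [x], acc.2) else (acc.1, acc.2 ++ [x])) (L, O)
      = (L ++ xs.filter p, O ++ xs.filter (fun x => !p x)) := by
  intro xs
  induction xs with
  | nil => intro L O; simp
  | cons x xs ih =>
    intro L O
    simp only [List.foldl_cons]
    cases hx : p x with
    | false => simp only [Bool.false_eq_true, if_false]; rw [ih]; simp [hx]
    | true => simp only [if_true]; rw [ih]; simp [hx]

-- ===== VERDICT (by name: the statement is the Claim_ definition above) =====
theorem sort_tests_for_session_py_spec : Claim_equal_sort_tests_for_session_py := by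
  intro ts _
  show sort_tests_for_session_py ts = sort_tests_for_session_py_alt ts
  unfold sort_tests_for_session_py sort_tests_for_session_py_alt
  rw [PySem.List.sorted_eq_foldl_insertBy]
  have hB := sorted_fold_bool (fun s => decide (PySem.Dict.get? (PySem.Dict.mk s) "type" ≠ some "login"))
    ts [] [] (by simp) (by simp)
  simp only [List.nil_append] at hB
  rw [hB]
  have hA := partition_fold (fun s => decide (PySem.Dict.get? (PySem.Dict.mk s) "type" = some "login")) ts [] []
  simp only [List.nil_append, decide_eq_true_eq] at hA
  rw [hA]
  simp [decide_not]
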